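-- pv_equiv track=rewrite | github.com/konstantinkonstantinovich/Numerical-Methods-Sprint01- | Laba1DM/app3.py | alg_symmetrical_difference
-- ===== SOURCE A (Python) =====
-- def alg_symmetrical_difference(A_set, B_set):
-- 	C_set = list()
-- 	i = 0
-- 	j = 0
-- 	while A_set and B_set:
-- 		if A_set[i] < B_set[i]:
-- 			C_set.append(A_set[i])
-- 			del A_set[i]
-- 		elif A_set[i] > B_set[i]:
-- 			C_set.append(B_set[j])
-- 			del B_set[i]
-- 		else:
-- 			del A_set[i]
-- 			del B_set[j]
-- 	if A_set:
-- 		C_set = C_set + A_set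
-- 	if B_set:
-- 		C_set = C_set + B_set
-- 	return C_set
-- ===== SOURCE B (Python) =====
-- def alg_symmetrical_difference(A_set, B_set):
--     # Two-pointer merge over indices; no front deletions, no argument mutation
--     # (A drains its arguments in place; equivalence is about the return value).
--     i = 0
--     j = 0
--     n = len(A_set)
--     m = len(B_set)
--     C_set = []
--     while i < n and j < m:
--         a = A_set[i]
--         b = B_set[j]
--         if a < b:
--             C_set.append(a)
--             i += 1
--         elif a > b:
--             C_set.append(b)
--             j += 1
--         else:
--             i += 1
--             j += 1
--     return C_set + A_set[i:] + B_set[j:]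
-- ===== Notes on version B (the rewrite author's own statement) =====
-- stated objective: faster
-- what changed: Replaced the loop that repeatedly deletes the front element of each input list (each del shifts the whole list) with a two-pointer index merge over the unchanged lists, appending the leftover slices at the end; B also no longer mutates its arguments.
import Mathlib
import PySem

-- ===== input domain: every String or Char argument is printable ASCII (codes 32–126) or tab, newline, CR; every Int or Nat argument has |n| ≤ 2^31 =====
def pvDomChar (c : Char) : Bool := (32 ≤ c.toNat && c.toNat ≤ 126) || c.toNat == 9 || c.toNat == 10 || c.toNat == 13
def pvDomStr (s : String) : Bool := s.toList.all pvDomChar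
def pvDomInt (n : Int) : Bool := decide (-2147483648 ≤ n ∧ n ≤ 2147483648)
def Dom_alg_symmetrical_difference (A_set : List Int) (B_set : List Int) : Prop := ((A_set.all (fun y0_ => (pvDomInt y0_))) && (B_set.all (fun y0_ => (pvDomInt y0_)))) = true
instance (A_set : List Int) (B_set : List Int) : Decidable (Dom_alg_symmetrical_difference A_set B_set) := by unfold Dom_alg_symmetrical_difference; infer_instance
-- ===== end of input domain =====

-- B replaces A's front-deleting merge loop by a two-pointer index merge; A mutates
-- (drains) its argument lists in place, B does not — the equivalence proved here is
-- about the return value only. Each loop's fuel parameter is only a totality guard: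
-- every iteration consumes at least one element / advances an index, so the fuel
-- |A_set| + |B_set| both loops are started with is never exhausted.

-- ===== PORT A =====
-- A's while loop: i and j stay 0, so every access and deletion is at the front;
-- the loop consumes the two lists from the front, appending to C_set.
def algSymLoopA : Nat → List Int → List Int → List Int → List Int × List Int × List Int
  | 0, A_set, B_set, C_set => (A_set, B_set, C_set)
  | fuel + 1, a :: A', b :: B', C_set =>
      if a < b then algSymLoopA fuel A' (b :: B') (C_set ++ [a])
      else if a > b then algSymLoopA fuel (a :: A') B' (C_set ++ [b])
      else algSymLoopA fuel A' B' C_set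
  | _ + 1, A_set, B_set, C_set => (A_set, B_set, C_set)

def alg_symmetrical_difference (A_set : List Int) (B_set : List Int) : List Int :=
  let r := algSymLoopA (A_set.length + B_set.length) A_set B_set []
  let C₁ := if r.1 ≠ [] then r.2.2 ++ r.1 else r.2.2
  if r.2.1 ≠ [] then C₁ ++ r.2.1 else C₁

-- ===== PORT B =====
-- B's while loop: indices i, j advance over the unchanged lists;
-- A_set[i:] / B_set[j:] for a nonnegative in-range index = List.drop.
def algSymLoopB : Nat → List Int → List Int → Nat → Nat → List Int → List Int
  | 0, A_set, B_set, i, j, C_set => C_set ++ A_set.drop i ++ B_set.drop j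
  | fuel + 1, A_set, B_set, i, j, C_set =>
      if h : i < A_set.length ∧ j < B_set.length then
        let a := A_set[i]'h.1
        let b := B_set[j]'h.2
        if a < b then algSymLoopB fuel A_set B_set (i + 1) j (C_set ++ [a])
        else if a > b then algSymLoopB fuel A_set B_set i (j + 1) (C_set ++ [b])
        else algSymLoopB fuel A_set B_set (i + 1) (j + 1) C_set
      else C_set ++ A_set.drop i ++ B_set.drop j

def alg_symmetrical_difference_alt (A_set : List Int) (B_set : List Int) : List Int :=
  algSymLoopB (A_set.length + B_set.length) A_set B_set 0 0 []

-- ===== PRECONDITION & SPEC =====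
def Spec_alg_symmetrical_difference (A_set : List Int) (B_set : List Int) (out : List Int) : Prop := out = alg_symmetrical_difference_alt A_set B_set
instance (A_set : List Int) (B_set : List Int) (out : List Int) : Decidable (Spec_alg_symmetrical_difference A_set B_set out) := by unfold Spec_alg_symmetrical_difference; infer_instance

-- ===== CLAIM (what is proved, stated in full; the proofs are below) =====
def Claim_equal_alg_symmetrical_difference : Prop := ∀ (A_set : List Int) (B_set : List Int), Dom_alg_symmetrical_difference A_set B_set → Spec_alg_symmetrical_difference A_set B_set (alg_symmetrical_difference A_set B_set)

-- ===== LEMMAS AND PROOFS =====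

-- the tail appends of A's loop result, with the vacuous if-guards removed
theorem algSymLoopA_finish (r : List Int × List Int × List Int) :
    (if r.2.1 ≠ [] then (if r.1 ≠ [] then r.2.2 ++ r.1 else r.2.2) ++ r.2.1
     else (if r.1 ≠ [] then r.2.2 ++ r.1 else r.2.2)) = r.2.2 ++ r.1 ++ r.2.1 := by
  obtain ⟨a, b, c⟩ := r
  by_cases ha : a = [] <;> by_cases hb : b = [] <;> simp [ha, hb]

-- B's index loop computes the same as A's front-deleting loop run on the suffixes,
-- followed by appending the leftovers (for every fuel value alike).
theorem algSymLoopB_eq (fuel : Nat) (A_set B_set : List Int) (i j : Nat) (C_set : List Int) :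
    algSymLoopB fuel A_set B_set i j C_set =
      (algSymLoopA fuel (A_set.drop i) (B_set.drop j) C_set).2.2 ++
      (algSymLoopA fuel (A_set.drop i) (B_set.drop j) C_set).1 ++
      (algSymLoopA fuel (A_set.drop i) (B_set.drop j) C_set).2.1 := by
  induction fuel generalizing i j C_set with
  | zero => simp [algSymLoopA, algSymLoopB]
  | succ fuel ih =>
    by_cases h : i < A_set.length ∧ j < B_set.length
    · rw [List.drop_eq_getElem_cons h.1, List.drop_eq_getElem_cons h.2]
      rw [algSymLoopB]
      rw [dif_pos h]
      simp only [algSymLoopA]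
      by_cases hlt : A_set[i] < B_set[j]
      · rw [if_pos hlt, if_pos hlt, ← List.drop_eq_getElem_cons h.2]
        exact ih (i + 1) j (C_set ++ [A_set[i]])
      · rw [if_neg hlt, if_neg hlt]
        by_cases hgt : A_set[i] > B_set[j]
        · rw [if_pos hgt, if_pos hgt, ← List.drop_eq_getElem_cons h.1]
          exact ih i (j + 1) (C_set ++ [B_set[j]])
        · rw [if_neg hgt, if_neg hgt]
          exact ih (i + 1) (j + 1) C_set
    · have hnil : A_set.drop i = [] ∨ B_set.drop j = [] := by
        rcases Nat.lt_or_ge i A_set.length with hi | hi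
        · right; exact List.drop_eq_nil_of_le (by omega)
        · left; exact List.drop_eq_nil_of_le hi
      rw [algSymLoopB, dif_neg h]
      rcases hnil with hA | hB
      · rw [hA]; cases hd : B_set.drop j <;> simp [algSymLoopA]
      · rw [hB]; cases hd : A_set.drop i <;> simp [algSymLoopA]

-- ===== VERDICT (by name: the statement is the Claim_ definition above) =====
theorem alg_symmetrical_difference_spec : Claim_equal_alg_symmetrical_difference := by
  intro A_set B_set _
  unfold Spec_alg_symmetrical_difference alg_symmetrical_difference alg_symmetrical_difference_alt
  rw [algSymLoopB_eq]
  simp only [List.drop_zero]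
  exact algSymLoopA_finish _
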